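-- pv_equiv track=rewrite | github.com/pantaryl/adventofcode | 2020/src/day4.py | makePassports
-- ===== SOURCE A (Python) =====
-- def makePassports(inputData):
--     passports       = []
--     currentPassport = {}
--     for line in inputData:
--         line = line.rstrip()
--         if line == "" or line == "\n":
--             passports.append(currentPassport)
--             currentPassport = {}
--         else:
--             splitLine = line.split(" ")
--             for split in splitLine:
--                 key, value = split.split(":")
--                 currentPassport[key] = value
--     passports.append(currentPassport)
--     return passports
-- ===== SOURCE B (Python) =====
-- def makePassports(inputData):
--     # Recursive divide-and-conquer: strip all lines up front, then split at the
--     # first blank line (index + slicing) and recurse on the remainder; each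
--     # block is materialised directly as a dict comprehension over its tokens.
--     stripped = [line.rstrip() for line in inputData]
--     return _blocks(stripped)
--
-- def _blocks(lines):
--     if "" in lines:
--         i = lines.index("")
--         return [_passport(lines[:i])] + _blocks(lines[i + 1:])
--     return [_passport(lines)]
--
-- def _passport(lines):
--     return dict(tok.split(":") for line in lines for tok in line.split(" "))
-- ===== Notes on version B (the rewrite author's own statement) =====
-- stated objective: alternative
-- what changed: Replaces A's single iterative accumulate-and-flush loop over a running dict by a recursive divide-and-conquer: strip all lines once, locate the first blank line with index(), slice the list into head block and tail, recurse on the tail, and materialise each block as one dict comprehension over its tokens.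
import Mathlib
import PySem

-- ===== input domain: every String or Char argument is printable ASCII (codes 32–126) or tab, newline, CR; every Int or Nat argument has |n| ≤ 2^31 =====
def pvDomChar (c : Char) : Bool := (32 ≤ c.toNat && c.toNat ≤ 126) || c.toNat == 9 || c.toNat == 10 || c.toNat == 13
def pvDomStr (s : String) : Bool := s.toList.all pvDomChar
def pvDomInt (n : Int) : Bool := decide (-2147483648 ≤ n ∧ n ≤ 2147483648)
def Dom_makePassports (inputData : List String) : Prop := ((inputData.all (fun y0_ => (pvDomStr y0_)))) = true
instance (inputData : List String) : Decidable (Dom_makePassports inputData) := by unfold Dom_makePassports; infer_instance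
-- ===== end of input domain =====

-- B replaces A's iterative accumulate-and-flush loop by a recursive divide-and-conquer
-- (strip all lines, split at the first blank line, recurse); same cost, different shape.

-- s.split(sep) for a NONEMPTY literal sep: PySem.Str.split? is some there (none only for sep = "")
def pvSplit (s sep : String) : List String := (PySem.Str.split? s sep).getD []

-- one token 'k:v' inserted into a dict; a token that does not split into exactly
-- two parts makes Python raise ValueError (excluded by Pre_), here it is skipped
def pvInsTok (d : PySem.Dict String String) (tok : String) : PySem.Dict String String :=
  match pvSplit tok ":" with
  | [k, v] => d.insert k v
  | _ => d

-- ===== PORT A =====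
-- A's single loop: state = (finished passports, current dict); blank line flushes
def makePassportsLoop : List String → List (List (String × String)) → PySem.Dict String String → List (List (String × String))
  | [], passports, current => passports ++ [current.items]
  | line :: rest, passports, current =>
    let l := PySem.Str.rstrip line
    if l = "" ∨ l = "\n" then
      makePassportsLoop rest (passports ++ [current.items]) PySem.Dict.empty
    else
      makePassportsLoop rest passports ((pvSplit l " ").foldl pvInsTok current)

def makePassports (inputData : List String) : List (List (String × String)) :=
  makePassportsLoop inputData [] PySem.Dict.empty

-- ===== PORT B =====
-- all tokens of one line folded into the dict (the inner generator clause)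
def pvLineIns (d : PySem.Dict String String) (line : String) : PySem.Dict String String :=
  (pvSplit line " ").foldl pvInsTok d

-- _passport: dict(tok.split(':') for line in lines for tok in line.split(' '))
def pvPassport (lines : List String) : List (String × String) :=
  (lines.foldl pvLineIns PySem.Dict.empty).items

-- _blocks: split at the first blank line (lines[:i] = take i, lines[i+1:] = drop (i+1);
-- exact here since i = lines.index("") is a nonnegative in-range index) and recurse
def pvBlocks (ls : List String) : List (List (String × String)) :=
  if h : "" ∈ ls then
    let i := (PySem.List.index? ls "").getD 0
    [pvPassport (ls.take i)] ++ pvBlocks (ls.drop (i + 1))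
  else [pvPassport ls]
termination_by ls.length
decreasing_by
  have hne : 0 < ls.length := List.length_pos_of_ne_nil (by rintro rfl; simp at h)
  simp only [List.length_drop]
  omega

def makePassports_alt (inputData : List String) : List (List (String × String)) :=
  pvBlocks (inputData.map PySem.Str.rstrip)

-- ===== PRECONDITION & SPEC =====
-- Pre_ excludes exactly the inputs on which both Pythons raise ValueError: a
-- space-separated token of some non-blank (rstripped) line without exactly one ':'.
def Pre_makePassports (inputData : List String) : Prop :=
  ∀ line ∈ inputData, PySem.Str.rstrip line ≠ "" →
    ∀ tok ∈ ((PySem.Str.split? (PySem.Str.rstrip line) " ").getD []),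
      ((PySem.Str.split? tok ":").getD []).length = 2
instance (inputData : List String) : Decidable (Pre_makePassports inputData) := by
  unfold Pre_makePassports; infer_instance

def pvWitness_makePassports : List String := ["ecl:gry pid:860", "", "byr:1937 iyr:2017"]

def Spec_makePassports (inputData : List String) (out : List (List (String × String))) : Prop := out = makePassports_alt inputData
instance (inputData : List String) (out : List (List (String × String))) : Decidable (Spec_makePassports inputData out) := by unfold Spec_makePassports; infer_instance

-- ===== CLAIM (what is proved, stated in full; the proofs are below) =====
def Claim_equal_makePassports : Prop := ∀ (inputData : List String), Dom_makePassports inputData → Pre_makePassports inputData → Spec_makePassports inputData (makePassports inputData)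

-- ===== LEMMAS AND PROOFS =====

-- rstrip never returns "\n" (its last char cannot be whitespace), so A's dead
-- 'line == "\n"' test never fires.
theorem pv_rstrip_ne_newline (s : String) : PySem.Str.rstrip s ≠ "\n" := by
  intro h
  have h' : (PySem.Str.rstrip s).toList = "\n".toList := by rw [h]
  rw [PySem.Str.toList_rstrip] at h'
  unfold PySem.Chars.rstrip at h'
  have h2 : (s.toList.reverse.dropWhile PySem.Chars.isspace) = ['\n'] := by
    have := congrArg List.reverse h'
    simpa using this
  have := List.head?_dropWhile_not PySem.Chars.isspace s.toList.reverse
  rw [h2] at this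
  simp at this
  exact absurd this (by decide)

-- proof-side generalisation of pvBlocks: the head block starts from dict d
def pvBlocksFrom (d : PySem.Dict String String) (ls : List String) : List (List (String × String)) :=
  if "" ∈ ls then
    let i := (PySem.List.index? ls "").getD 0
    [((ls.take i).foldl pvLineIns d).items] ++ pvBlocks (ls.drop (i + 1))
  else [(ls.foldl pvLineIns d).items]

theorem pvBlocksFrom_empty (ls : List String) :
    pvBlocksFrom PySem.Dict.empty ls = pvBlocks ls := by
  rw [pvBlocks.eq_def]
  unfold pvBlocksFrom pvPassport
  split_ifs <;> rfl

theorem pvBlocksFrom_blank (d : PySem.Dict String String) (rs : List String) :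
    pvBlocksFrom d ("" :: rs) = d.items :: pvBlocks rs := by
  have hidx : PySem.List.index? ("" :: rs) "" = some 0 := PySem.List.index?_cons_self "" rs
  simp only [pvBlocksFrom, if_pos (List.mem_cons_self), hidx, Option.getD_some,
    List.take_zero, List.foldl_nil, List.drop_succ_cons, List.drop_zero,
    List.singleton_append]

theorem pvBlocksFrom_line (d : PySem.Dict String String) (l : String) (rs : List String)
    (hl : l ≠ "") : pvBlocksFrom d (l :: rs) = pvBlocksFrom (pvLineIns d l) rs := by
  by_cases hm : "" ∈ rs
  · rcases Option.isSome_iff_exists.1 ((PySem.List.index?_isSome_iff rs "").2 hm) with ⟨k, hk⟩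
    have hidx : PySem.List.index? (l :: rs) "" = some (k + 1) := by
      rw [PySem.List.index?_cons_of_ne rs hl, hk]; rfl
    simp only [pvBlocksFrom, if_pos (List.mem_cons_of_mem l hm), if_pos hm, hidx, hk,
      Option.getD_some, List.take_succ_cons, List.foldl_cons, List.drop_succ_cons]
  · have hcons : ¬ ("" ∈ l :: rs) := by simp [hm, Ne.symm hl]
    simp only [pvBlocksFrom, if_neg hcons, if_neg hm, List.foldl_cons]

-- the loop invariant: A's loop from (ps, d) equals ps followed by B's recursive
-- split of the remaining (stripped) lines with the head block seeded from d.
theorem pv_main (lines : List String) (ps : List (List (String × String)))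
    (d : PySem.Dict String String) :
    makePassportsLoop lines ps d = ps ++ pvBlocksFrom d (lines.map PySem.Str.rstrip) := by
  induction lines generalizing ps d with
  | nil => simp [makePassportsLoop, pvBlocksFrom]
  | cons line rest ih =>
    simp only [makePassportsLoop, List.map_cons]
    by_cases hl : PySem.Str.rstrip line = ""
    · rw [if_pos (Or.inl hl), ih, hl, pvBlocksFrom_blank, pvBlocksFrom_empty]
      simp
    · have hl2 : ¬ (PySem.Str.rstrip line = "" ∨ PySem.Str.rstrip line = "\n") := by
        rintro (h | h)
        · exact hl h
        · exact pv_rstrip_ne_newline line h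
      rw [if_neg hl2, ih, pvBlocksFrom_line d _ _ hl]
      rfl

-- ===== VERDICT (by name: the statement is the Claim_ definition above) =====
theorem makePassports_spec : Claim_equal_makePassports := by
  intro inputData _ _
  unfold Spec_makePassports makePassports makePassports_alt
  rw [pv_main, pvBlocksFrom_empty]
  simp
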